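-- pv_equiv track=rewrite | github.com/KIKUTA7/python-OOP | CW7.py | trippleCount
-- ===== SOURCE A (Python) =====
-- def trippleCount (k):
--     ans = 0
--     for i in range(k):
--         str1 = bin(i)
--         count = 0
--         for j in range(len(str1)):
--             if(str1[j] == '1'):
--                 count +=1
--         if(count == 3):
--             ans+=1
--     return ans
-- ===== SOURCE B (Python) =====
-- def trippleCount(k):
--     # Count i in [0, n) whose binary representation has exactly t one-bits,
--     # by recursing on the halves i = 2*j + bit instead of scanning every i.
--     def cnt(n, t):
--         if n <= 0 or t < 0:
--             return 0
--         m, b = divmod(n, 2)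
--         return cnt(m, t) + cnt(m, t - 1) + (1 if b == 1 and m.bit_count() == t else 0)
--     return cnt(k, 3)
-- ===== Notes on version B (the rewrite author's own statement) =====
-- stated objective: faster
-- what changed: Replaces the brute-force scan of all i < k (converting each to a binary string and counting '1' characters) with a divide-and-conquer recurrence on n = 2m+b that counts numbers below n with a given popcount directly.
import Mathlib
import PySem

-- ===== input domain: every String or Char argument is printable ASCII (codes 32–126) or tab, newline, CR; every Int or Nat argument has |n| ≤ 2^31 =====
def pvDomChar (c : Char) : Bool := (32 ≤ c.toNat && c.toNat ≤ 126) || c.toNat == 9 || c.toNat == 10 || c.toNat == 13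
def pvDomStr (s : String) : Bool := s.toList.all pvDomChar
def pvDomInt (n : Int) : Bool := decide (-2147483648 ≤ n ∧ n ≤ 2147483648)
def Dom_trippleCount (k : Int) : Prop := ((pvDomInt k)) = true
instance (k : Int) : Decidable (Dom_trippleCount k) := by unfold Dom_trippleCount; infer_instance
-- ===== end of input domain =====

-- B replaces A's scan of every i < k (building bin(i) and counting '1' characters) by a
-- divide-and-conquer recurrence on n = 2m + b counting numbers below n with a given popcount;
-- a timing run measured B faster at the largest size.

-- ===== PORT A =====
-- for i in range(k): str1 = bin(i); count '1' characters by index; ans += 1 when count == 3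
def trippleCount (k : Int) : Int :=
  (PySem.List.pyRange 0 k 1).foldl (fun ans i =>
    let str1 := PySem.Int.pyBin i
    let count : Int := (PySem.List.pyRange 0 (PySem.Str.len str1) 1).foldl
      (fun count j => if PySem.Str.pyGet? str1 j = some '1' then count + 1 else count) 0
    if count = 3 then ans + 1 else ans) 0

-- ===== PORT B =====
-- cnt(n, t) = how many i in [0, n) have i.bit_count() == t, via n = 2m + b (divmod(n, 2))
def pvCnt (n : Int) (t : Int) : Int :=
  if n ≤ 0 ∨ t < 0 then 0
  else
    pvCnt (PySem.Int.floordiv n 2) t + pvCnt (PySem.Int.floordiv n 2) (t - 1) +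
      (if PySem.Int.mod n 2 = 1 ∧ (PySem.Int.bitCount (PySem.Int.floordiv n 2) : Int) = t
       then 1 else 0)
termination_by n.toNat
decreasing_by
  all_goals
    rw [not_or, not_le] at *
    rw [PySem.Int.floordiv_eq_ediv_of_pos (by omega : (0:Int) < 2)]
    omega

def trippleCount_alt (k : Int) : Int := pvCnt k 3

-- ===== PRECONDITION & SPEC =====
def Spec_trippleCount (k : Int) (out : Int) : Prop := out = trippleCount_alt k
instance (k : Int) (out : Int) : Decidable (Spec_trippleCount k out) := by unfold Spec_trippleCount; infer_instance

-- ===== CLAIM (what is proved, stated in full; the proofs are below) =====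
def Claim_equal_trippleCount : Prop := ∀ (k : Int), Dom_trippleCount k → Spec_trippleCount k (trippleCount k)

-- ===== LEMMAS AND PROOFS =====

-- the common spec: how many naturals below n have popcount t (t : Int so that t - 1 stays total)
def pvG (n : Nat) (t : Int) : Nat :=
  (List.range n).countP (fun (i : Nat) => decide ((PySem.Int.bitCount (i : Int) : Int) = t))

theorem pv_countP_range_getElem (xs : List Char) (c : Char) :
    (List.range xs.length).countP (fun j => decide (xs[j]? = some c)) = xs.count c := by
  induction xs with
  | nil => simp
  | cons x xs ih =>
    rw [List.length_cons, List.range_succ_eq_map, List.countP_cons, List.countP_map]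
    simp only [Function.comp_def, Nat.succ_eq_add_one, List.getElem?_cons_succ,
      List.getElem?_cons_zero, List.count_cons, ih]
    rcases eq_or_ne x c with h | h
    · simp [h]; exact ih
    · simp [h, Ne.symm h]; exact ih

theorem pv_toDigitsCore_count :
    ∀ (f n : Nat) (l : List Char), n < f →
      (Nat.toDigitsCore 2 f n l).count '1' = PySem.Int.bitCount (n : Int) + l.count '1' := by
  intro f
  induction f with
  | zero => intro n l h; omega
  | succ f ih =>
    intro n l h
    rw [Nat.toDigitsCore]
    by_cases h2 : n / 2 = 0
    · rw [if_pos h2]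
      have hb0 : PySem.Int.bitCount (0 : Int) = 0 := by decide
      have hb1 : PySem.Int.bitCount (1 : Int) = 1 := by decide
      have hd0 : Nat.digitChar 0 = '0' := by decide
      have hd1 : Nat.digitChar 1 = '1' := by decide
      rcases (by omega : n = 0 ∨ n = 1) with rfl | rfl <;>
        simp [List.count_cons, hb0, hb1, hd0, hd1] <;> omega
    · rw [if_neg h2]
      have hlt : n / 2 < f := by omega
      rw [ih (n / 2) _ hlt, PySem.Int.bitCount_natCast (by omega : 0 < n), List.count_cons]
      have hd0 : Nat.digitChar 0 = '0' := by decide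
      have hd1 : Nat.digitChar 1 = '1' := by decide
      rcases Nat.mod_two_eq_zero_or_one n with hm | hm <;> rw [hm] <;> simp [hd0, hd1] <;> omega

theorem pvG_succ (n : Nat) (t : Int) :
    pvG (n + 1) t = pvG n t + (if (PySem.Int.bitCount (n : Int) : Int) = t then 1 else 0) := by
  simp [pvG, List.range_succ, List.countP_append, List.countP_cons]

theorem pv_bitCount_two_mul (m : Nat) :
    PySem.Int.bitCount ((2 * m : Nat) : Int) = PySem.Int.bitCount (m : Int) := by
  rcases Nat.eq_zero_or_pos m with h | h
  · subst h; decide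
  · rw [PySem.Int.bitCount_natCast (by omega)]
    have h1 : 2 * m % 2 = 0 := by omega
    have h2 : 2 * m / 2 = m := by omega
    rw [h1, h2]; omega

theorem pv_bitCount_two_mul_add_one (m : Nat) :
    PySem.Int.bitCount ((2 * m + 1 : Nat) : Int) = PySem.Int.bitCount (m : Int) + 1 := by
  rw [PySem.Int.bitCount_natCast (by omega)]
  have h1 : (2 * m + 1) % 2 = 1 := by omega
  have h2 : (2 * m + 1) / 2 = m := by omega
  rw [h1, h2]; omega

theorem pvG_rec0 (m : Nat) (t : Int) :
    pvG (2 * m) t = pvG m t + pvG m (t - 1) := by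
  induction m generalizing t with
  | zero => simp [pvG]
  | succ m ih =>
    have key : 2 * (m + 1) = (2 * m) + 1 + 1 := by ring
    rw [key, pvG_succ, pvG_succ, ih, pvG_succ, pvG_succ]
    simp only [pv_bitCount_two_mul, pv_bitCount_two_mul_add_one]
    split_ifs <;> omega

theorem pvG_rec1 (m : Nat) (t : Int) :
    pvG (2 * m + 1) t = pvG m t + pvG m (t - 1) +
      (if (PySem.Int.bitCount (m : Int) : Int) = t then 1 else 0) := by
  induction m generalizing t with
  | zero =>
    have hbc : PySem.Int.bitCount ((0 : Nat) : Int) = 0 := by decide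
    rw [show 2 * 0 + 1 = 0 + 1 from rfl, pvG_succ, hbc]
    simp [pvG]
  | succ m ih =>
    have key : 2 * (m + 1) + 1 = (2 * m + 1) + 1 + 1 := by ring
    have hx : (2 * m + 1 + 1 : Nat) = 2 * (m + 1) := by ring
    rw [key, pvG_succ, pvG_succ, ih, pvG_succ, pvG_succ]
    simp only [hx, pv_bitCount_two_mul, pv_bitCount_two_mul_add_one]
    split_ifs <;> omega

theorem pvG_neg (n : Nat) (t : Int) (ht : t < 0) : pvG n t = 0 := by
  rw [pvG, List.countP_eq_zero]
  intro i _
  simp only [decide_eq_true_eq]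
  omega

theorem pvCnt_eq_pvG (N : Nat) : ∀ (n t : Int), n.toNat = N → pvCnt n t = (pvG n.toNat t : Int) := by
  induction N using Nat.strong_induction_on with
  | _ N ih =>
    intro n t hN
    rw [pvCnt]
    by_cases h : n ≤ 0 ∨ t < 0
    · rw [if_pos h]
      rcases h with h | h
      · rw [Int.toNat_of_nonpos h]; simp [pvG]
      · rw [pvG_neg _ _ h]; simp
    · rw [if_neg h]
      rw [not_or, not_le, not_lt] at h
      obtain ⟨hn, ht⟩ := h
      have hfd : PySem.Int.floordiv n 2 = n / 2 := PySem.Int.floordiv_eq_ediv_of_pos (by omega)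
      have hmd : PySem.Int.mod n 2 = n % 2 := PySem.Int.mod_eq_emod_of_pos (by omega)
      have h2 : (n / 2).toNat = n.toNat / 2 := by omega
      have hrec : (n / 2).toNat < N := by omega
      rw [hfd, hmd, ih _ hrec (n / 2) t rfl, ih _ hrec (n / 2) (t - 1) rfl, h2]
      have hsplit : n.toNat = 2 * (n.toNat / 2) + n.toNat % 2 := by omega
      rcases Nat.mod_two_eq_zero_or_one n.toNat with hp | hp
      · have hm0 : n % 2 = 0 := by omega
        rw [hm0]
        conv_rhs => rw [hsplit]
        rw [hp, Nat.add_zero, pvG_rec0]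
        simp
      · have hm1 : n % 2 = 1 := by omega
        have harg : ((n / 2 : Int)) = ((n.toNat / 2 : Nat) : Int) := by omega
        rw [hm1, harg]
        conv_rhs => rw [hsplit]
        rw [hp, pvG_rec1]
        split_ifs <;> push_cast <;> omega

theorem pv_inner (i : Nat) :
    (PySem.List.pyRange 0 (PySem.Str.len (PySem.Int.pyBin (i : Int))) 1).foldl
        (fun count j => if PySem.Str.pyGet? (PySem.Int.pyBin (i : Int)) j = some '1'
          then count + 1 else count) (0 : Int)
      = (PySem.Int.bitCount (i : Int) : Int) := by
  rw [PySem.Str.len_eq, PySem.List.pyRange_zero_natCast, List.foldl_map,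
    PySem.List.foldl_ite_add_one (fun j : Nat => PySem.Str.pyGet? (PySem.Int.pyBin (i : Int)) (j : Int) = some '1')]
  simp only [PySem.Str.pyGet?_natCast]
  rw [pv_countP_range_getElem]
  rw [PySem.Int.toList_pyBin, PySem.Int.toBinChars0b,
    if_neg (by omega : ¬ ((i : Int) < 0)), Int.toNat_natCast]
  rw [List.count_cons, List.count_cons, Nat.toDigits,
    pv_toDigitsCore_count (i + 1) i [] (by omega)]
  simp

theorem pvA_eq_pvG (k : Int) : trippleCount k = (pvG k.toNat 3 : Int) := by
  by_cases hk : k ≤ 0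
  · rw [trippleCount, PySem.List.pyRange_one_eq_nil hk, Int.toNat_of_nonpos hk]
    simp [pvG]
  · rw [trippleCount]
    conv_lhs => rw [show k = ((k.toNat : Nat) : Int) from (Int.toNat_of_nonneg (by omega)).symm]
    rw [PySem.List.pyRange_zero_natCast, List.foldl_map]
    have hbody : (fun (ans : Int) (iN : Nat) =>
        (fun ans (i : Int) =>
          let str1 := PySem.Int.pyBin i
          let count : Int := (PySem.List.pyRange 0 (PySem.Str.len str1) 1).foldl
            (fun count j => if PySem.Str.pyGet? str1 j = some '1' then count + 1 else count) 0
          if count = 3 then ans + 1 else ans) ans (iN : Int))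
        = fun (ans : Int) (iN : Nat) => if (PySem.Int.bitCount (iN : Int) : Int) = 3 then ans + 1 else ans := by
      funext ans iN
      simp only [pv_inner iN]
    rw [hbody, PySem.List.foldl_ite_add_one (fun iN : Nat => (PySem.Int.bitCount (iN : Int) : Int) = 3)]
    simp only [pvG, zero_add]

-- ===== VERDICT (by name: the statement is the Claim_ definition above) =====
theorem trippleCount_spec : Claim_equal_trippleCount := by
  intro k _
  unfold Spec_trippleCount trippleCount_alt
  rw [pvA_eq_pvG, pvCnt_eq_pvG k.toNat k 3 rfl]
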